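-- pv_equiv track=rewrite | github.com/anewjean/Algorithm | Baekjoon/구현/시뮬레이션/암호화된_비밀번호.py | is_origin_to_encrypted
-- ===== SOURCE A (Python) =====
-- from collections import Counter
-- from collections import Counter
--
-- def is_origin_to_encrypted(origin, encrypted):
--     window_size = len(origin)
--     origin_counter = Counter(origin)
--
--     window_counter = Counter(encrypted[:window_size])
--     if window_counter == origin_counter:
--         return True
--
--     for i in range(window_size, len(encrypted)):
--         start_char = encrypted[i - window_size]
--         end_char = encrypted[i]
--
--         window_counter[start_char] -= 1
--         if window_counter[start_char] == 0:
--             del window_counter[start_char]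
--         window_counter[end_char] += 1
--
--         if window_counter == origin_counter:
--             return True
--
--     return False
-- ===== SOURCE B (Python) =====
-- from collections import Counter
--
--
-- def is_origin_to_encrypted(origin, encrypted):
--     origin_counter = Counter(origin)
--     window_size = len(origin)
--     for i in range(len(encrypted) - window_size + 1):
--         if Counter(encrypted[i:i + window_size]) == origin_counter:
--             return True
--     return False
-- ===== Notes on version B (the rewrite author's own statement) =====
-- stated objective: simpler
-- what changed: Replaces A's incrementally maintained sliding-window counter (decrement/delete/increment bookkeeping) by rebuilding the window's Counter from the slice at each start index and comparing it to the origin's Counter; no mutable window state is kept.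
import Mathlib
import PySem

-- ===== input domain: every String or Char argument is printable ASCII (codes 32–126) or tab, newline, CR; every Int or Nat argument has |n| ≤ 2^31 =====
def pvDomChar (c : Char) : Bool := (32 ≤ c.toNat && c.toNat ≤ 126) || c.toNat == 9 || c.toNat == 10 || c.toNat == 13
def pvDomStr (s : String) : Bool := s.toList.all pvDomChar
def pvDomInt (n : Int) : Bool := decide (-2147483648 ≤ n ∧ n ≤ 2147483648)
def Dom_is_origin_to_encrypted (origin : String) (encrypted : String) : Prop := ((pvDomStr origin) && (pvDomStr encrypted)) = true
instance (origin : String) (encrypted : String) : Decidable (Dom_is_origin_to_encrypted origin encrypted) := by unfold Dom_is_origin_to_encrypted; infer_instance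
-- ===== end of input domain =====

-- B recomputes each window's Counter from its slice instead of A's incrementally
-- maintained sliding counter; objective: simpler (no mutable window bookkeeping).

-- Python's `dict ==` (order-insensitive comparison of keys and values); shared by
-- both ports as the transliteration of `Counter == Counter`.
def pyDictEq (d1 d2 : PySem.Dict Char Int) : Bool :=
  (d1.keys.all (fun k => d1.get? k == d2.get? k)) &&
  (d2.keys.all (fun k => d2.get? k == d1.get? k))

-- ===== PORT A =====
-- literal transliteration of A: initial window counter, then a sliding update loop
-- (decrement departing char, delete a zero entry, increment arriving char) with
-- early exit modelled by a Bool in the fold state.  The indexing e[i-ws], e[i] is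
-- always in range in this loop, so pyGetD's default is never used.
def is_origin_to_encrypted (origin : String) (encrypted : String) : Bool :=
  let o := origin.toList
  let e := encrypted.toList
  let window_size : Int := o.length
  let origin_counter := PySem.Dict.counter o
  let window_counter := PySem.Dict.counter (PySem.List.slice e none (some window_size))
  if pyDictEq window_counter origin_counter then true
  else
    ((PySem.List.pyRange window_size e.length).foldl (fun st i =>
      if st.1 then st else
        let start_char := PySem.List.pyGetD e (i - window_size) ' '
        let end_char := PySem.List.pyGetD e i ' '
        let wc := st.2.modify start_char 0 (· - 1)
        let wc := if wc.getD start_char 0 == 0 then wc.erase start_char else wc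
        let wc := wc.modify end_char 0 (· + 1)
        (pyDictEq wc origin_counter, wc))
      (false, window_counter)).1

-- ===== PORT B =====
-- literal transliteration of B: Counter(origin) once, then for each start index i
-- compare Counter(encrypted[i:i+window_size]) with it (any = early-return loop).
def is_origin_to_encrypted_alt (origin : String) (encrypted : String) : Bool :=
  let o := origin.toList
  let e := encrypted.toList
  let window_size := o.length
  let origin_counter := PySem.Dict.counter o
  (List.range (e.length + 1 - window_size)).any (fun i =>
    pyDictEq (PySem.Dict.counter ((e.drop i).take window_size)) origin_counter)

-- ===== PRECONDITION & SPEC =====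
def Spec_is_origin_to_encrypted (origin : String) (encrypted : String) (out : Bool) : Prop := out = is_origin_to_encrypted_alt origin encrypted
instance (origin : String) (encrypted : String) (out : Bool) : Decidable (Spec_is_origin_to_encrypted origin encrypted out) := by unfold Spec_is_origin_to_encrypted; infer_instance

-- ===== CLAIM (what is proved, stated in full; the proofs are below) =====
def Claim_equal_is_origin_to_encrypted : Prop := ∀ (origin : String) (encrypted : String), Dom_is_origin_to_encrypted origin encrypted → Spec_is_origin_to_encrypted origin encrypted (is_origin_to_encrypted origin encrypted)

-- ===== LEMMAS AND PROOFS =====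

-- window j matches: the length-|o| window of e starting at j has o's multiset
def matchAt (o e : List Char) (j : Nat) : Prop :=
  ∀ k, List.count k ((e.drop j).take o.length) = List.count k o

-- the invariant A's window dict keeps: nodup keys, entries are the window's
-- counts, and no stored value is 0
def WInv (wc : PySem.Dict Char Int) (w : List Char) : Prop :=
  wc.keys.Nodup ∧ (∀ k, wc.getD k 0 = (List.count k w : Int)) ∧
    (∀ k, wc.contains k = true → wc.getD k 0 ≠ 0)

-- A's sliding-update of the window dict, abstracted for the proofs (the fold body
-- of the port is definitionally `stepD` plus the equality test)
def stepD (wc : PySem.Dict Char Int) (s t : Char) : PySem.Dict Char Int :=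
  let wc1 := wc.modify s 0 (· - 1)
  let wc2 := if wc1.getD s 0 == 0 then wc1.erase s else wc1
  wc2.modify t 0 (· + 1)

-- --- erase lemmas (PySem's book has none for erase) ---

lemma find?_filter_ne (l : List (Char × Int)) (k k' : Char) (h : k' ≠ k) :
    (l.filter (fun p => !(p.1 == k))).find? (fun p => p.1 == k') =
      l.find? (fun p => p.1 == k') := by
  induction l with
  | nil => rfl
  | cons p t ih =>
    by_cases hp : p.1 = k
    · have hk' : (p.1 == k') = false := by
        rw [hp]; exact beq_eq_false_iff_ne.mpr (Ne.symm h)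
      have hf : (!(p.1 == k)) = false := by simp [hp]
      rw [List.filter_cons, hf, if_neg (by simp), ih, List.find?_cons, hk']
    · rw [List.filter_cons, if_pos (by simp [hp])]
      by_cases hp' : p.1 = k'
      · rw [List.find?_cons, List.find?_cons, beq_iff_eq.mpr hp']
      · simp only [List.find?_cons, beq_eq_false_iff_ne.mpr hp']
        exact ih

lemma get?_erase (d : PySem.Dict Char Int) (k k' : Char) :
    (d.erase k).get? k' = if k' = k then none else d.get? k' := by
  rcases d with ⟨items⟩
  by_cases h : k' = k
  · subst h
    simp only [PySem.Dict.erase, PySem.Dict.get?]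
    rw [List.find?_eq_none.mpr]
    · rfl
    · intro p hp
      have := (List.mem_filter.mp hp).2
      simpa using this
  · simp only [PySem.Dict.erase, PySem.Dict.get?, if_neg h]
    rw [find?_filter_ne _ _ _ h]

lemma getD_erase (d : PySem.Dict Char Int) (k k' : Char) (v : Int) :
    (d.erase k).getD k' v = if k' = k then v else d.getD k' v := by
  simp only [PySem.Dict.getD, get?_erase]
  split_ifs <;> rfl

lemma contains_erase (d : PySem.Dict Char Int) (k k' : Char) :
    (d.erase k).contains k' = (decide (k' ≠ k) && d.contains k') := by
  rw [PySem.Dict.contains_eq_isSome_get?, PySem.Dict.contains_eq_isSome_get?, get?_erase]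
  by_cases h : k' = k <;> simp [h]

lemma nodup_keys_erase (d : PySem.Dict Char Int) (k : Char) (h : d.keys.Nodup) :
    (d.erase k).keys.Nodup := by
  rcases d with ⟨items⟩
  simp only [PySem.Dict.erase, PySem.Dict.keys] at *
  exact (List.Sublist.map _ List.filter_sublist).nodup h

-- --- characterising dict lookups under WInv ---

lemma get?_of_inv {wc : PySem.Dict Char Int} {w : List Char} (h : WInv wc w) (k : Char) :
    wc.get? k = if List.count k w = 0 then none else some (List.count k w : Int) := by
  obtain ⟨-, hcnt, hnz⟩ := h
  cases hc : wc.contains k with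
  | false =>
    have hnone : wc.get? k = none := by
      rw [PySem.Dict.contains_eq_isSome_get?] at hc
      exact Option.not_isSome_iff_eq_none.mp (by simp [hc])
    have h0 : (List.count k w : Int) = 0 := by
      have := hcnt k
      rw [PySem.Dict.getD_eq_get?_getD, hnone] at this
      simpa using this.symm
    have hz : List.count k w = 0 := by exact_mod_cast h0
    simp [hnone, hz]
  | true =>
    have hsome : (wc.get? k).isSome := by rw [← PySem.Dict.contains_eq_isSome_get?]; exact hc
    obtain ⟨v, hv⟩ := Option.isSome_iff_exists.mp hsome
    have hgd : wc.getD k 0 = v := by rw [PySem.Dict.getD_eq_get?_getD, hv]; rfl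
    have hvc : v = (List.count k w : Int) := by rw [← hgd, hcnt]
    have hne : v ≠ 0 := hgd ▸ hnz k hc
    have hz : List.count k w ≠ 0 := by
      intro h0; apply hne; rw [hvc, h0]; rfl
    simp [hv, hz, hvc]

lemma inv_counter (w : List Char) : WInv (PySem.Dict.counter w) w := by
  refine ⟨PySem.Dict.nodup_keys_counter w, fun k => PySem.Dict.getD_counter w k, fun k hk => ?_⟩
  rw [PySem.Dict.contains_counter] at hk
  rw [PySem.Dict.getD_counter]
  have hmem : k ∈ w := by simpa using hk
  have hpos : 0 < List.count k w := List.count_pos_iff.mpr hmem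
  exact_mod_cast Nat.pos_iff_ne_zero.mp hpos

lemma mem_keys_of_count_ne {wc : PySem.Dict Char Int} {w : List Char} (h : WInv wc w)
    {k : Char} (hk : List.count k w ≠ 0) : k ∈ wc.keys := by
  apply (PySem.Dict.contains_iff_mem_keys wc k).mp
  rw [PySem.Dict.contains_eq_isSome_get?, get?_of_inv h, if_neg hk]
  rfl

lemma dictEq_iff {d1 d2 : PySem.Dict Char Int} {w1 w2 : List Char}
    (h1 : WInv d1 w1) (h2 : WInv d2 w2) :
    pyDictEq d1 d2 = true ↔ ∀ k, List.count k w1 = List.count k w2 := by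
  constructor
  · intro h k
    have hand := (Bool.and_eq_true _ _).mp h
    have ha1 := List.all_eq_true.mp hand.1
    have ha2 := List.all_eq_true.mp hand.2
    by_cases h1z : List.count k w1 = 0 <;> by_cases h2z : List.count k w2 = 0
    · rw [h1z, h2z]
    · have := ha2 k (mem_keys_of_count_ne h2 h2z)
      rw [beq_iff_eq, get?_of_inv h1, get?_of_inv h2, if_neg h2z, if_pos h1z] at this
      exact absurd this (by simp)
    · have := ha1 k (mem_keys_of_count_ne h1 h1z)
      rw [beq_iff_eq, get?_of_inv h1, get?_of_inv h2, if_neg h1z, if_pos h2z] at this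
      exact absurd this (by simp)
    · have := ha1 k (mem_keys_of_count_ne h1 h1z)
      rw [beq_iff_eq, get?_of_inv h1, get?_of_inv h2, if_neg h1z, if_neg h2z] at this
      exact_mod_cast Option.some_injective _ this
  · intro h
    have hpt : ∀ k, d1.get? k = d2.get? k := by
      intro k; rw [get?_of_inv h1, get?_of_inv h2, h k]
    apply (Bool.and_eq_true _ _).mpr
    constructor <;> (apply List.all_eq_true.mpr; intro k _; simp [hpt k])

-- --- the sliding step preserves the invariant ---

lemma step_inv (o e : List Char) (j : Nat) (hws : 1 ≤ o.length)
    (hij : j + o.length < e.length) (wc : PySem.Dict Char Int)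
    (h : WInv wc ((e.drop j).take o.length)) :
    WInv (stepD wc (e[j]'(by omega)) (e[j + o.length]'hij))
      ((e.drop (j + 1)).take o.length) := by
  obtain ⟨w1, hwseq⟩ : ∃ w1, o.length = w1 + 1 := ⟨o.length - 1, by omega⟩
  set s := e[j]'(by omega) with hs
  set t := e[j + o.length]'hij with ht
  set m := (e.drop (j + 1)).take w1 with hm
  have hw : (e.drop j).take o.length = s :: m := by
    rw [List.drop_eq_getElem_cons (l := e) (i := j) (by omega), hwseq, List.take_succ_cons]
  have hw' : (e.drop (j + 1)).take o.length = m ++ [t] := by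
    rw [hwseq, List.take_add_one, hm]
    congr 1
    rw [List.getElem?_drop]
    have hjw : j + 1 + w1 = j + o.length := by omega
    rw [hjw, List.getElem?_eq_getElem hij]
    rfl
  obtain ⟨hnd, hcnt, hnz⟩ := h
  rw [hw] at hcnt
  set wc1 := wc.modify s 0 (· - 1) with hwc1
  set wc2 := if wc1.getD s 0 == 0 then wc1.erase s else wc1 with hwc2
  have hstep : stepD wc s t = wc2.modify t 0 (· + 1) := rfl
  have hgd1 : ∀ k, wc1.getD k 0 = if k = s then wc.getD s 0 - 1 else wc.getD k 0 := by
    intro k; rw [hwc1, PySem.Dict.getD_modify]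
  have hgd2 : ∀ k, wc2.getD k 0 = wc1.getD k 0 := by
    intro k; rw [hwc2]
    split_ifs with hz
    · rw [getD_erase]
      split_ifs with hk
      · rw [hk]; exact (beq_iff_eq.mp hz).symm
      · rfl
    · rfl
  have hgd3 : ∀ k, (stepD wc s t).getD k 0 =
      if k = t then wc2.getD t 0 + 1 else wc2.getD k 0 := by
    intro k; rw [hstep, PySem.Dict.getD_modify]
  have hbase : ∀ k, wc2.getD k 0 = (List.count k m : Int) := by
    intro k; rw [hgd2, hgd1]
    by_cases hks : k = s
    · rw [hks, if_pos rfl, hcnt s, List.count_cons]; push_cast; simp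
    · have hsk : (s == k) = false := by simpa using Ne.symm hks
      rw [if_neg hks, hcnt k, List.count_cons, hsk]; push_cast; ring
  have hgd : ∀ k, (stepD wc s t).getD k 0 =
      (List.count k ((e.drop (j + 1)).take o.length) : Int) := by
    intro k; rw [hgd3, hw']
    by_cases hkt : k = t
    · subst hkt; rw [if_pos rfl, hbase, List.count_append]; push_cast; simp
    · have htk : (t == k) = false := by simpa using Ne.symm hkt
      rw [if_neg hkt, hbase, List.count_append]
      simp [List.count_cons, htk]
  refine ⟨?_, hgd, ?_⟩
  · have h1 : wc1.keys.Nodup := by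
      rw [hwc1, PySem.Dict.keys_modify]; exact PySem.Dict.nodup_keys_insert _ _ _ hnd
    have h2 : wc2.keys.Nodup := by
      rw [hwc2]; split_ifs
      · exact nodup_keys_erase _ _ h1
      · exact h1
    rw [hstep, PySem.Dict.keys_modify]; exact PySem.Dict.nodup_keys_insert _ _ _ h2
  · intro k hk
    rw [hstep, PySem.Dict.contains_modify] at hk
    by_cases hkt : k = t
    · rw [hgd k, hw']
      have hmem : t ∈ m ++ [t] := by simp
      have hpos : 0 < List.count k (m ++ [t]) := List.count_pos_iff.mpr (hkt ▸ hmem)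
      exact_mod_cast Nat.pos_iff_ne_zero.mp hpos
    · have hc2 : wc2.contains k = true := by
        rcases (by simpa using hk : k = t ∨ wc2.contains k = true) with h' | h'
        · exact absurd h' hkt
        · exact h'
      have hc1 : wc1.contains k = true → k ≠ s → wc.getD k 0 ≠ 0 := by
        intro hck hkns
        apply hnz
        rw [hwc1, PySem.Dict.contains_modify] at hck
        rcases (by simpa using hck : k = s ∨ wc.contains k = true) with h' | h'
        · exact absurd h' hkns
        · exact h'
      have hgoal : wc2.getD k 0 ≠ 0 := by
        by_cases hz : (wc1.getD s 0 == 0) = true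
        · have hwc2' : wc2 = wc1.erase s := by rw [hwc2, if_pos hz]
          rw [hwc2'] at hc2 ⊢
          rw [contains_erase] at hc2
          obtain ⟨hkns, hck⟩ := Bool.and_eq_true_iff.mp hc2
          have hkns' : k ≠ s := by simpa using hkns
          rw [getD_erase, if_neg hkns', hgd1, if_neg hkns']
          exact hc1 hck hkns'
        · have hwc2' : wc2 = wc1 := by rw [hwc2, if_neg hz]
          rw [hwc2'] at hc2 ⊢
          by_cases hks : k = s
          · subst hks; simpa using hz
          · rw [hgd1, if_neg hks]
            exact hc1 hc2 hks
      rw [hgd3, if_neg hkt]; exact hgoal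

-- --- A's loop, abstracted ---

def stepA (e : List Char) (ws : Int) (oc : PySem.Dict Char Int) :
    (Bool × PySem.Dict Char Int) → Int → (Bool × PySem.Dict Char Int) :=
  fun st i =>
    if st.1 then st else
      let wc := stepD st.2 (PySem.List.pyGetD e (i - ws) ' ') (PySem.List.pyGetD e i ' ')
      (pyDictEq wc oc, wc)

lemma foldA_true (e : List Char) (ws : Int) (oc : PySem.Dict Char Int)
    (l : List Int) (wc : PySem.Dict Char Int) :
    l.foldl (stepA e ws oc) (true, wc) = (true, wc) := by
  induction l with
  | nil => rfl
  | cons a t ih => rw [List.foldl_cons]; exact ih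

lemma loopA (o e : List Char) (hws : 1 ≤ o.length) :
    ∀ (n i : Nat) (wc : PySem.Dict Char Int), n = e.length - i → o.length ≤ i → i ≤ e.length →
      WInv wc ((e.drop (i - o.length)).take o.length) →
      (((PySem.List.pyRange (i : Int) (e.length : Int)).foldl
          (stepA e (o.length : Int) (PySem.Dict.counter o)) (false, wc)).1 = true
        ↔ ∃ j, i - o.length < j ∧ j ≤ e.length - o.length ∧ matchAt o e j) := by
  intro n
  induction n with
  | zero =>
    intro i wc hn hi hle _
    have : i = e.length := by omega
    subst this
    rw [PySem.List.pyRange_one_eq_nil (le_refl _)]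
    simp only [List.foldl_nil]
    constructor
    · intro h; exact absurd h (by simp)
    · rintro ⟨j, h1, h2, -⟩; omega
  | succ n ih =>
    intro i wc hn hi hle hinv
    have hilt : i < e.length := by omega
    rw [PySem.List.pyRange_one_cons (by exact_mod_cast hilt)]
    rw [List.foldl_cons]
    set j := i - o.length with hj
    have hji : j + o.length = i := by omega
    have hjlt : j + o.length < e.length := by omega
    have hsc : PySem.List.pyGetD e ((i : Int) - (o.length : Int)) ' ' = e[j]'(by omega) := by
      have hcast : (i : Int) - (o.length : Int) = ((j : Nat) : Int) := by omega
      rw [hcast, PySem.List.pyGetD_natCast, List.getD_eq_getElem e ' ' (by omega)]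
    have hec : PySem.List.pyGetD e (i : Int) ' ' = e[j + o.length]'hjlt := by
      rw [PySem.List.pyGetD_natCast, List.getD_eq_getElem e ' ' (by omega)]
      simp [hji]
    have hstep1 : stepA e (o.length : Int) (PySem.Dict.counter o) (false, wc) (i : Int) =
        (pyDictEq (stepD wc (e[j]'(by omega)) (e[j + o.length]'hjlt)) (PySem.Dict.counter o),
         stepD wc (e[j]'(by omega)) (e[j + o.length]'hjlt)) := by
      simp only [stepA, hsc, hec]
      rfl
    set wc' := stepD wc (e[j]'(by omega)) (e[j + o.length]'hjlt) with hwc'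
    have hinv' : WInv wc' ((e.drop (j + 1)).take o.length) := by
      rw [hwc']
      exact step_inv o e j hws hjlt wc hinv
    have hmatch : pyDictEq wc' (PySem.Dict.counter o) = true ↔ matchAt o e (j + 1) :=
      dictEq_iff hinv' (inv_counter o)
    rw [hstep1]
    by_cases hb : pyDictEq wc' (PySem.Dict.counter o) = true
    · rw [hb, foldA_true]
      simp only [true_iff]
      exact ⟨j + 1, by omega, by omega, hmatch.mp hb⟩
    · rw [Bool.not_eq_true] at hb
      rw [hb]
      have hcast2 : (i : Int) + 1 = ((i + 1 : Nat) : Int) := by push_cast; ring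
      rw [hcast2]
      rw [ih (i + 1) wc' (by omega) (by omega) (by omega)
        (by have : i + 1 - o.length = j + 1 := by omega
            rw [this]; exact hinv')]
      have hnm : ¬ matchAt o e (j + 1) := by
        intro hm; exact absurd (hmatch.mpr hm) (by simp [hb])
      constructor
      · rintro ⟨j', h1, h2, h3⟩
        exact ⟨j', by omega, h2, h3⟩
      · rintro ⟨j', h1, h2, h3⟩
        refine ⟨j', ?_, h2, h3⟩
        rcases Nat.lt_or_ge (i + 1 - o.length) j' with h | h
        · exact h
        · have : j' = j + 1 := by omega
          exact absurd (this ▸ h3) hnm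

-- --- B's loop characterisation ---

lemma altB_iff (o e : List Char) :
    ((List.range (e.length + 1 - o.length)).any (fun i =>
        pyDictEq (PySem.Dict.counter ((e.drop i).take o.length)) (PySem.Dict.counter o))) = true
      ↔ ∃ i, i < e.length + 1 - o.length ∧ matchAt o e i := by
  rw [List.any_eq_true]
  constructor
  · rintro ⟨i, hmem, hp⟩
    exact ⟨i, List.mem_range.mp hmem, (dictEq_iff (inv_counter _) (inv_counter o)).mp hp⟩
  · rintro ⟨i, hlt, hm⟩
    exact ⟨i, List.mem_range.mpr hlt, (dictEq_iff (inv_counter _) (inv_counter o)).mpr hm⟩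

lemma main_eq (origin encrypted : String) :
    is_origin_to_encrypted origin encrypted = is_origin_to_encrypted_alt origin encrypted := by
  simp only [is_origin_to_encrypted, is_origin_to_encrypted_alt]
  set o := origin.toList with ho
  set e := encrypted.toList with he
  have hslice : PySem.List.slice e none (some ((o.length : Nat) : Int)) = e.take o.length := by
    rw [PySem.List.slice_to e (Int.natCast_nonneg _)]
    simp
  rw [hslice]
  by_cases hE : pyDictEq (PySem.Dict.counter (e.take o.length)) (PySem.Dict.counter o) = true
  · rw [if_pos hE]
    have hcnt := (dictEq_iff (inv_counter (e.take o.length)) (inv_counter o)).mp hE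
    have hperm := List.perm_iff_count.mpr hcnt
    have hlen : o.length ≤ e.length := by
      have := hperm.length_eq
      rw [List.length_take] at this
      omega
    have h0 : matchAt o e 0 := fun k => by rw [List.drop_zero]; exact hcnt k
    exact ((altB_iff o e).mpr ⟨0, by omega, h0⟩).symm
  · rw [if_neg hE]
    by_cases hws0 : o.length = 0
    · exfalso
      apply hE
      have ho0 : o = [] := List.length_eq_zero_iff.mp hws0
      rw [ho0]
      simp only [List.length_nil, List.take_zero]
      rfl
    have hws : 1 ≤ o.length := by omega
    by_cases hlen : e.length < o.length
    · have hA : PySem.List.pyRange ((o.length : Nat) : Int) ((e.length : Nat) : Int) = [] :=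
        PySem.List.pyRange_one_eq_nil (by exact_mod_cast le_of_lt hlen)
      have hBr : e.length + 1 - o.length = 0 := by omega
      rw [hA, hBr]
      simp
    · have hlen' : o.length ≤ e.length := by omega
      show ((PySem.List.pyRange ((o.length : Nat) : Int) ((e.length : Nat) : Int)).foldl
          (stepA e ((o.length : Nat) : Int) (PySem.Dict.counter o))
          (false, PySem.Dict.counter (e.take o.length))).1 =
        (List.range (e.length + 1 - o.length)).any (fun i =>
          pyDictEq (PySem.Dict.counter ((e.drop i).take o.length)) (PySem.Dict.counter o))
      have hinv : WInv (PySem.Dict.counter (e.take o.length))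
          ((e.drop (o.length - o.length)).take o.length) := by
        have h' := inv_counter (e.take o.length)
        have hz : o.length - o.length = 0 := by omega
        rw [hz, List.drop_zero]
        exact h'
      rw [Bool.eq_iff_iff, altB_iff o e,
        loopA o e hws (e.length - o.length) o.length _ rfl (le_refl _) hlen' hinv]
      have h0 : ¬ matchAt o e 0 := by
        intro hm
        apply hE
        exact (dictEq_iff (inv_counter _) (inv_counter o)).mpr
          (fun k => by simpa using hm k)
      constructor
      · rintro ⟨j, h1, h2, h3⟩
        exact ⟨j, by omega, h3⟩
      · rintro ⟨i, hlt, hm⟩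
        rcases Nat.eq_zero_or_pos i with h | h
        · exact absurd (h ▸ hm) h0
        · exact ⟨i, by omega, by omega, hm⟩

-- ===== VERDICT (by name: the statement is the Claim_ definition above) =====
theorem is_origin_to_encrypted_spec : Claim_equal_is_origin_to_encrypted := by
  intro origin encrypted _
  unfold Spec_is_origin_to_encrypted
  exact main_eq origin encrypted
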